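-- pv_equiv track=rewrite | github.com/BastienZim/AdventOfCode | 2023/day_5/day.py | get_interesting_things
-- ===== SOURCE A (Python) =====
-- list_to_find= ["seeds", "seed-to-soil map", "soil-to-fertilizer map", "fertilizer-to-water map", "water-to-light map", "light-to-temperature map", "temperature-to-humidity map", "humidity-to-location map"]
--
-- def get_interesting_things(lines):
--     new_stock=[]
--     all_things = {}
--     for i,l in enumerate(lines):
--         for w in list_to_find:
--             if(w in l):
--
--                 if(len(new_stock)>0):
--                     new_stock[0] = ": ".join(new_stock[0].split(":")[1:])
--                     new_stock = list(filter(lambda x: len(x)>0,new_stock))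
--                     new_stock = list(map(lambda x: x.split(" "),new_stock))
--                     new_stock = list(map(lambda x: [int(a) for a in x if(len(a)>0)],new_stock))
--                     if("to" in current_name):
--                         current_name = "".join(current_name.split(" map")[:-1])
--                     all_things[current_name]= new_stock
--                 new_stock = []
--                 current_name = w
--         new_stock.append(l)
--
--     new_stock[0] = ": ".join(new_stock[0].split(":")[1:])
--     new_stock = list(filter(lambda x: len(x)>0,new_stock))
--     new_stock = list(map(lambda x: x.split(" "),new_stock))
--     new_stock = list(map(lambda x: [int(a) for a in x if(len(a)>0)],new_stock))
--     if("to" in current_name):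
--         current_name = "".join(current_name.split(" map")[:-1])
--     all_things[current_name]= new_stock
--     return(all_things)
-- ===== SOURCE B (Python) =====
-- list_to_find= ["seeds", "seed-to-soil map", "soil-to-fertilizer map", "fertilizer-to-water map", "water-to-light map", "light-to-temperature map", "temperature-to-humidity map", "humidity-to-location map"]
--
-- def get_interesting_things(lines):
--     # pass 1: cut the lines into (name, block) sections; a header line starts its block
--     sections = []
--     k = 0
--     while k < len(lines):
--         matches = [w for w in list_to_find if w in lines[k]]
--         name = matches[-1]
--         block = [lines[k]]
--         k += 1
--         while k < len(lines) and not any(w in lines[k] for w in list_to_find):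
--             block.append(lines[k])
--             k += 1
--         sections.append((name, block))
--     # pass 2: transform each block and store it under its (cleaned) name
--     all_things = {}
--     for name, block in sections:
--         block = [": ".join(block[0].split(":")[1:])] + block[1:]
--         block = [r.split(" ") for r in block if len(r) > 0]
--         block = [[int(a) for a in r if len(a) > 0] for r in block]
--         if "to" in name:
--             name = "".join(name.split(" map")[:-1])
--         all_things[name] = block
--     return all_things
-- ===== Notes on version B (the rewrite author's own statement) =====
-- stated objective: alternative
-- what changed: B replaces A's single-pass flush-on-header loop with mutable state (new_stock/current_name and a duplicated trailing flush) by two passes: first cut the lines into (keyword, block) sections with index-based while-loops, then transform and store each section.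
import Mathlib
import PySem

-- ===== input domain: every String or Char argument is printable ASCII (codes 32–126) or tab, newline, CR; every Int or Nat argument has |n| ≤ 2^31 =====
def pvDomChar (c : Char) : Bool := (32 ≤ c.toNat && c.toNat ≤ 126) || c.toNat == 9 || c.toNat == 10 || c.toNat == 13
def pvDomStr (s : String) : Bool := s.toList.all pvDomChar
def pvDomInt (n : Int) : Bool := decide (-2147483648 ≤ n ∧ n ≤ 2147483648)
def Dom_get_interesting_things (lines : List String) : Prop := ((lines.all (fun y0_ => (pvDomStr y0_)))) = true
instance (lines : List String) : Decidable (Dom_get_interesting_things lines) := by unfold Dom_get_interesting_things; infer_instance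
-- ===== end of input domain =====

-- B cuts the lines into (header, block) sections in a first pass (nested while-loops over an index)
-- and transforms each section in a second pass, instead of A's single pass with flush-on-header;
-- the block/name transformations are the same code in both Pythons. Objective: alternative decomposition.

-- the module constant list_to_find
def listToFind : List String := ["seeds", "seed-to-soil map", "soil-to-fertilizer map", "fertilizer-to-water map", "water-to-light map", "light-to-temperature map", "temperature-to-humidity map", "humidity-to-location map"]

-- shared block transformation (this code appears verbatim in BOTH Pythons: A inlines it twice,
-- B runs it once per section in its second pass):
--   new_stock[0] = ": ".join(new_stock[0].split(":")[1:]); filter len>0; split(" "); int() of nonempty tokens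
-- (ns = [] is Python's IndexError on new_stock[0], and int() failure — none from PySem.Int.ofStr? —
-- is Python's ValueError: both are excluded by Pre_, so [] / getD 0 are never reached inside Pre_)
def processStock (ns : List String) : List (List Int) :=
  let ns := match ns with
    | [] => []
    | h :: t => (PySem.Str.join ": " (((PySem.Str.split? h ":").getD []).drop 1)) :: t
  let ns := ns.filter (fun x => PySem.Str.len x > 0)
  let ns := ns.map (fun x => (PySem.Str.split? x " ").getD [])
  ns.map (fun x => (x.filter (fun a => PySem.Str.len a > 0)).map (fun a => (PySem.Int.ofStr? a).getD 0))

-- if "to" in current_name: current_name = "".join(current_name.split(" map")[:-1])  (same in both Pythons)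
def fixName (name : String) : String :=
  if PySem.Str.isIn "to" name then
    PySem.Str.join "" (PySem.List.slice ((PySem.Str.split? name " map").getD []) none (some (-1)))
  else name

-- ===== PORT A =====
-- state = (new_stock, all_things, current_name); current_name is "" before Python first assigns it
-- (inside Pre_ the first line is a header, so "" is never used as a name)
def stepW (l : String) (st : List String × PySem.Dict String (List (List Int)) × String)
    (w : String) : List String × PySem.Dict String (List (List Int)) × String :=
  if PySem.Str.isIn w l then
    ([], if st.1.length > 0 then st.2.1.insert (fixName st.2.2) (processStock st.1) else st.2.1, w)
  else st

def stepA (st : List String × PySem.Dict String (List (List Int)) × String) (l : String) :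
    List String × PySem.Dict String (List (List Int)) × String :=
  let st := listToFind.foldl (stepW l) st
  (st.1 ++ [l], st.2.1, st.2.2)

def get_interesting_things (lines : List String) : List (String × List (List Int)) :=
  let st := lines.foldl stepA ([], PySem.Dict.empty, "")
  (st.2.1.insert (fixName st.2.2) (processStock st.1)).items

-- ===== PORT B =====
def isHeaderB (l : String) : Bool := listToFind.any (fun w => PySem.Str.isIn w l)

-- matches[-1] of matches = [w for w in list_to_find if w in l]  ([] is Python's IndexError,
-- excluded by Pre_)
def lastKw (l : String) : String := (listToFind.filter (fun w => PySem.Str.isIn w l)).getLastD ""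

-- pass 1: the two nested while-loops; the inner while collects the non-header lines after the header
def parseSecs : List String → List (String × List String)
  | [] => []
  | h :: t =>
    (lastKw h, h :: t.takeWhile (fun l => !isHeaderB l)) ::
      parseSecs (t.dropWhile (fun l => !isHeaderB l))
termination_by l => l.length
decreasing_by
  simp only [List.length_cons]
  exact Nat.lt_succ_of_le (List.length_dropWhile_le _ _)

-- pass 2: transform each section and store it
def get_interesting_things_alt (lines : List String) : List (String × List (List Int)) :=
  ((parseSecs lines).foldl
    (fun d p => d.insert (fixName p.1) (processStock p.2)) PySem.Dict.empty).items

-- ===== PRECONDITION & SPEC =====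
-- every nonempty ' '-token of the string parses as a Python int
def tokensOK (s : String) : Bool :=
  ((PySem.Str.split? s " ").getD []).all (fun t => t == "" || (PySem.Int.ofStr? t).isSome)

-- exactly the inputs where the Python A returns: empty input gives IndexError, a non-header first
-- line NameError at the first flush, and an unparsable token (in a header line: after the part up
-- to the first ':' is cut off) ValueError
def Pre_get_interesting_things (lines : List String) : Prop :=
  lines ≠ [] ∧ isHeaderB (lines.headD "") = true ∧
  (lines.all (fun l =>
    if isHeaderB l then tokensOK (PySem.Str.join ": " (((PySem.Str.split? l ":").getD []).drop 1))
    else tokensOK l)) = true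

instance (lines : List String) : Decidable (Pre_get_interesting_things lines) := by
  unfold Pre_get_interesting_things; infer_instance

def pvWitness_get_interesting_things : List String :=
  ["seeds: 79 14", "", "seed-to-soil map:", "50 98 2", "52 50 48"]

def Spec_get_interesting_things (lines : List String) (out : List (String × List (List Int))) : Prop := out = get_interesting_things_alt lines
instance (lines : List String) (out : List (String × List (List Int))) : Decidable (Spec_get_interesting_things lines out) := by unfold Spec_get_interesting_things; infer_instance

-- ===== CLAIM (what is proved, stated in full; the proofs are below) =====
def Claim_equal_get_interesting_things : Prop := ∀ (lines : List String), Dom_get_interesting_things lines → Pre_get_interesting_things lines → Spec_get_interesting_things lines (get_interesting_things lines)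

-- ===== LEMMAS AND PROOFS =====

-- evaluation of one step of the inner 'for w in list_to_find' loop
theorem stepW_no (l w : String) (hw : PySem.Str.isIn w l = false) (st) : stepW l st w = st := by
  unfold stepW; rw [hw]; simp

theorem stepW_yes_nil (l w : String) (hw : PySem.Str.isIn w l = true)
    (d : PySem.Dict String (List (List Int))) (name : String) :
    stepW l ([], d, name) w = ([], d, w) := by
  unfold stepW; rw [hw]; simp

theorem stepW_yes (l w : String) (hw : PySem.Str.isIn w l = true)
    (ns : List String) (hns : ns ≠ []) (d : PySem.Dict String (List (List Int))) (name : String) :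
    stepW l (ns, d, name) w = ([], d.insert (fixName name) (processStock ns), w) := by
  cases ns with
  | nil => exact absurd rfl hns
  | cons a t => unfold stepW; rw [hw]; simp

theorem filter_kw_pos (l w : String) (ws : List String) (hw : PySem.Str.isIn w l = true) :
    List.filter (fun w => PySem.Str.isIn w l) (w :: ws) =
      w :: List.filter (fun w => PySem.Str.isIn w l) ws := by
  have hw2 : PySem.Chars.isIn w.toList l.toList = true := by simpa using hw
  rw [List.filter_cons]; simp [hw2]

theorem filter_kw_neg (l w : String) (ws : List String) (hw : PySem.Str.isIn w l = false) :
    List.filter (fun w => PySem.Str.isIn w l) (w :: ws) =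
      List.filter (fun w => PySem.Str.isIn w l) ws := by
  have hw2 : PySem.Chars.isIn w.toList l.toList = false := by simpa using hw
  rw [List.filter_cons]; simp [hw2]

-- non-header line: no keyword matches, the inner loop leaves the state untouched
theorem innerFold_no_match (ws : List String) (l : String)
    (h : ∀ w ∈ ws, PySem.Str.isIn w l = false) (st) :
    ws.foldl (stepW l) st = st := by
  induction ws with
  | nil => rfl
  | cons w ws ih =>
    rw [List.foldl_cons, stepW_no l w (h w (by simp)), ih (fun w hw => h w (by simp [hw]))]

-- once new_stock is empty, further matches only rename current_name to the last matching keyword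
theorem innerFold_empty (ws : List String) (l : String)
    (d : PySem.Dict String (List (List Int))) (name : String) :
    ws.foldl (stepW l) (([] : List String), d, name) =
      ([], d, (ws.filter (fun w => PySem.Str.isIn w l)).getLastD name) := by
  induction ws generalizing name with
  | nil => rfl
  | cons w ws ih =>
    rw [List.foldl_cons]
    by_cases hw : PySem.Str.isIn w l = true
    · rw [stepW_yes_nil l w hw, ih, filter_kw_pos l w ws hw, List.getLastD_cons]
    · rw [stepW_no l w (by simpa using hw), ih, filter_kw_neg l w ws (by simpa using hw)]

-- header line with nonempty new_stock: flush once under the old name, then keep the LAST match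
theorem innerFold_match (ws : List String) (l : String)
    (ns : List String) (hns : ns ≠ [])
    (d : PySem.Dict String (List (List Int))) (name : String)
    (hm : ∃ w ∈ ws, PySem.Str.isIn w l = true) :
    ws.foldl (stepW l) (ns, d, name) =
      ([], d.insert (fixName name) (processStock ns),
        (ws.filter (fun w => PySem.Str.isIn w l)).getLastD "") := by
  induction ws with
  | nil => rcases hm with ⟨_, h, _⟩; cases h
  | cons w ws ih =>
    rw [List.foldl_cons]
    by_cases hw : PySem.Str.isIn w l = true
    · rw [stepW_yes l w hw ns hns d name, innerFold_empty,
        filter_kw_pos l w ws hw, List.getLastD_cons]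
    · rw [stepW_no l w (by simpa using hw), filter_kw_neg l w ws (by simpa using hw)]
      rcases hm with ⟨w', hw', hin⟩
      rcases List.mem_cons.mp hw' with rfl | hw2
      · exact absurd hin hw
      · exact ih ⟨w', hw2, hin⟩

theorem stepA_non_header (l : String) (hl : isHeaderB l = false)
    (st : List String × PySem.Dict String (List (List Int)) × String) :
    stepA st l = (st.1 ++ [l], st.2.1, st.2.2) := by
  unfold stepA
  rw [innerFold_no_match]
  intro w hw
  simp only [isHeaderB, List.any_eq_false] at hl
  have := hl w hw
  simpa using this

theorem stepA_header (l : String) (hl : isHeaderB l = true)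
    (ns : List String) (hns : ns ≠ []) (d : PySem.Dict String (List (List Int))) (name : String) :
    stepA (ns, d, name) l = ([l], d.insert (fixName name) (processStock ns), lastKw l) := by
  unfold stepA lastKw
  simp only [isHeaderB, List.any_eq_true] at hl
  rw [innerFold_match _ _ _ hns _ _ hl]
  rfl

theorem stepA_header_nil (l : String) (hl : isHeaderB l = true)
    (d : PySem.Dict String (List (List Int))) (name : String) :
    stepA ([], d, name) l = ([l], d, lastKw l) := by
  unfold stepA lastKw
  rw [innerFold_empty]
  simp only [isHeaderB, List.any_eq_true] at hl
  rcases hfilt : listToFind.filter (fun w => PySem.Str.isIn w l) with _ | ⟨x, xs⟩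
  · rcases hl with ⟨w, hw, hin⟩
    have hin2 : PySem.Chars.isIn w.toList l.toList = true := by simpa using hin
    have : w ∈ listToFind.filter (fun w => PySem.Str.isIn w l) := by
      simp [List.mem_filter, hw, hin2]
    rw [hfilt] at this; cases this
  · simp [List.getLastD]

-- A's fold over a run of non-header lines only appends them to new_stock
theorem foldA_body (body : List String) (hb : ∀ l ∈ body, isHeaderB l = false)
    (ns : List String) (d : PySem.Dict String (List (List Int))) (name : String) :
    body.foldl stepA (ns, d, name) = (ns ++ body, d, name) := by
  induction body generalizing ns with
  | nil => simp
  | cons l body ih =>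
    simp only [List.foldl_cons, stepA_non_header l (hb l (by simp))]
    rw [ih (fun l hl => hb l (by simp [hl]))]
    simp

-- the bridge: A's remaining fold from a mid-section state equals B's section list continued
theorem foldA_eq_parseSecs (n : Nat) : ∀ (rest : List String), rest.length ≤ n →
    ∀ (ns : List String) (d : PySem.Dict String (List (List Int))) (name : String), ns ≠ [] →
    (let st := rest.foldl stepA (ns, d, name)
     (st.2.1.insert (fixName st.2.2) (processStock st.1)).items) =
    (((name, ns ++ rest.takeWhile (fun l => !isHeaderB l)) ::
        parseSecs (rest.dropWhile (fun l => !isHeaderB l))).foldl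
      (fun d p => d.insert (fixName p.1) (processStock p.2)) d).items := by
  induction n with
  | zero =>
    intro rest hlen ns d name _
    have : rest = [] := List.eq_nil_of_length_eq_zero (Nat.le_zero.mp hlen)
    subst this; simp [parseSecs]
  | succ n ih =>
    intro rest hlen ns d name hns
    rcases hdrop : rest.dropWhile (fun l => !isHeaderB l) with _ | ⟨h', rest2⟩
    · -- no header in rest
      have htake : rest.takeWhile (fun l => !isHeaderB l) = rest := by
        have := List.takeWhile_append_dropWhile (p := fun l => !isHeaderB l) (l := rest)
        rw [hdrop, List.append_nil] at this; exact this
      have hb : ∀ l ∈ rest, isHeaderB l = false := by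
        intro l hl
        rw [← htake] at hl
        have := List.mem_takeWhile_imp hl
        simpa using this
      rw [foldA_body rest hb, htake]
      simp [parseSecs]
    · -- rest = body ++ h' :: rest2 with h' the first header
      have hsplit : rest = rest.takeWhile (fun l => !isHeaderB l) ++ h' :: rest2 := by
        conv_lhs => rw [← List.takeWhile_append_dropWhile (p := fun l => !isHeaderB l) (l := rest)]
        rw [hdrop]
      have hb : ∀ l ∈ rest.takeWhile (fun l => !isHeaderB l), isHeaderB l = false := by
        intro l hl
        have := List.mem_takeWhile_imp hl
        simpa using this
      have hne : rest.dropWhile (fun l => !isHeaderB l) ≠ [] := by rw [hdrop]; simp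
      have hh' : isHeaderB h' = true := by
        have h1 := List.head_dropWhile_not (p := fun l => !isHeaderB l) (l := rest) hne
        have h3 : (rest.dropWhile (fun l => !isHeaderB l)).head? = some h' := by rw [hdrop]; rfl
        have h4 := List.head?_eq_some_head (l := rest.dropWhile (fun l => !isHeaderB l)) hne
        rw [h3] at h4
        rw [Option.some.inj h4]
        simpa using h1
      have hlen2 : rest2.length ≤ n := by
        have : rest.length = (rest.takeWhile (fun l => !isHeaderB l)).length + rest2.length + 1 := by
          conv_lhs => rw [hsplit]
          simp [List.length_append]; omega
        omega
      conv_lhs => rw [hsplit]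
      rw [List.foldl_append, foldA_body _ hb, List.foldl_cons,
        stepA_header h' hh' _ (by simp [hns]) d name]
      rw [ih rest2 hlen2 [h'] _ (lastKw h') (by simp)]
      simp [parseSecs]

-- ===== VERDICT (by name: the statement is the Claim_ definition above) =====
theorem get_interesting_things_spec : Claim_equal_get_interesting_things := by
  intro lines _ hpre
  obtain ⟨hne, hhead, -⟩ := hpre
  rcases lines with _ | ⟨h, t⟩
  · exact absurd rfl hne
  simp only [List.headD_cons] at hhead
  show get_interesting_things (h :: t) = get_interesting_things_alt (h :: t)
  unfold get_interesting_things get_interesting_things_alt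
  rw [List.foldl_cons, stepA_header_nil h hhead]
  rw [foldA_eq_parseSecs t.length t (Nat.le_refl _) [h] PySem.Dict.empty (lastKw h) (by simp)]
  rw [parseSecs]
  simp [List.foldl_cons]
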